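-- pv_equiv track=rewrite | github.com/dochammoc123/sync-music-libraries | library_sync_and_upgrade_updated.py | choose_album_year
-- ===== SOURCE A (Python) =====
-- from collections import Counter
--
-- def choose_album_year(items):
--     """
--     Given a list of (path, tags) for an album, pick a canonical year
--     to use in the folder name.
--
--     Strategy:
--       - Collect all non-empty year strings from tags["year"].
--       - If none, return "" (no year in folder).
--       - Otherwise:
--           * Find the most common year.
--           * If there's a tie, pick the earliest year numerically.
--     """
--     years = [t["year"] for (_p, t) in items if t.get("year")]
--     if not years:
--         return ""
--
--     counts = Counter(years)
--     max_count = max(counts.values())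
--     candidates = [y for y, c in counts.items() if c == max_count]
--
--     numeric_candidates = []
--     for y in candidates:
--         try:
--             numeric_candidates.append((int(y[:4]), y))
--         except ValueError:
--             numeric_candidates.append((9999, y))
--
--     numeric_candidates.sort(key=lambda x: (x[0], x[1]))
--     return numeric_candidates[0][1]
-- ===== SOURCE B (Python) =====
-- def choose_album_year(items):
--     years = [t["year"] for (_p, t) in items if t.get("year")]
--     if not years:
--         return ""
--
--     def key(y):
--         try:
--             return (int(y[:4]), y)
--         except ValueError:
--             return (9999, y)
--
--     # Sort all collected year strings once; equal years become contiguous runs.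
--     ys = sorted(years, key=key)
--     # One run-length scan: the first run whose length beats the best so far wins,
--     # so the most frequent year is chosen, ties resolved by the smaller sort key.
--     best = cur = ys[0]
--     best_len = cur_len = 0
--     for y in ys:
--         if y == cur:
--             cur_len += 1
--         else:
--             cur, cur_len = y, 1
--         if cur_len > best_len:
--             best, best_len = cur, cur_len
--     return best
-- ===== Notes on version B (the rewrite author's own statement) =====
-- stated objective: alternative
-- what changed: Replaces A's Counter-based pipeline (count, max over counts, filter candidates, numeric-key sort, take head) by a Counter-free algorithm: sort the collected year strings once by (numeric-prefix-or-9999, string) and pick the longest run in a single run-length scan, first run winning ties.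
import Mathlib
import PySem

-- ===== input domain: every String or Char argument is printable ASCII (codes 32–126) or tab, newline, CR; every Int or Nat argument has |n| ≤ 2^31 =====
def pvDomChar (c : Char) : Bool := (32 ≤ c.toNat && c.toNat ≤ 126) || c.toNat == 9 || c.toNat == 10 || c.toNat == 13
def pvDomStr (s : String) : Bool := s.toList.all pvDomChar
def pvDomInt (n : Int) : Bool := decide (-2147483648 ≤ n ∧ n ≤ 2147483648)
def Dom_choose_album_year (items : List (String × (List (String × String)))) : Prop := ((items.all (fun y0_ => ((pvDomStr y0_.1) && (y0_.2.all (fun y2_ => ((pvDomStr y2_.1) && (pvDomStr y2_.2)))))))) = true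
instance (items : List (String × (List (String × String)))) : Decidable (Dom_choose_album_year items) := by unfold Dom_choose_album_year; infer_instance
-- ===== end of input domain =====

-- B drops the Counter entirely: it sorts the collected year strings once and picks the
-- longest (first on ties) run in a single run-length scan (alternative algorithm, no speed claim).

-- shared helper: both Pythons contain verbatim `int(y[:4])` with the ValueError → 9999 fallback
def pvNum4 (y : String) : Int :=
  match PySem.Int.ofStr? (PySem.Str.slice y none (some 4)) with
  | some n => n
  | none => 9999

-- shared helper: both Pythons contain verbatim the comprehension
-- `[t["year"] for (_p, t) in items if t.get("year")]` (truthy = present and non-empty)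
def pvYears (items : List (String × (List (String × String)))) : List String :=
  items.foldl (fun acc pt =>
    match PySem.Dict.get? (PySem.Dict.mk pt.2) "year" with
    | some y => if y = "" then acc else acc ++ [y]
    | none => acc) []

-- ===== PORT A =====
-- `counts.values()`'s max is total-ported with .getD 0 and `numeric_candidates[0]` with a
-- match on pyGet?; both fallback branches are unreachable because years ≠ [] there.
def choose_album_year (items : List (String × (List (String × String)))) : String :=
  let years := pvYears items
  if years = [] then ""
  else
    let counts := PySem.Dict.counter years
    let max_count := (PySem.List.max? counts.values (fun v => v)).getD 0
    let candidates := (counts.items.filter (fun p => p.2 == max_count)).map (fun p => p.1)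
    let numeric_candidates := candidates.map (fun y => (pvNum4 y, y))
    match PySem.List.pyGet? (PySem.List.sorted2 numeric_candidates (fun x => x.1) (fun x => x.2)) 0 with
    | some q => q.2
    | none => ""

-- ===== PORT B =====
-- the loop body of Source B's scan: state (best, best_len, cur, cur_len)
def pvStep (st : String × Int × String × Int) (y : String) : String × Int × String × Int :=
  let cc := if y = st.2.2.1 then (st.2.2.1, st.2.2.2 + 1) else (y, (1 : Int))
  if cc.2 > st.2.1 then (cc.1, cc.2, cc.1, cc.2) else (st.1, st.2.1, cc.1, cc.2)

-- sorted(years, key=key) with key y = (int(y[:4]) or 9999, y), then the run-length scan;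
-- the [] branch of the match is unreachable (years ≠ [] there).
def choose_album_year_alt (items : List (String × (List (String × String)))) : String :=
  let years := pvYears items
  if years = [] then ""
  else
    let ys := PySem.List.sorted2 years (fun y => pvNum4 y) (fun y => y)
    match ys with
    | [] => ""
    | y0 :: _ => (ys.foldl pvStep (y0, 0, y0, 0)).1

-- ===== PRECONDITION & SPEC =====
def Spec_choose_album_year (items : List (String × (List (String × String)))) (out : String) : Prop := out = choose_album_year_alt items
instance (items : List (String × (List (String × String)))) (out : String) : Decidable (Spec_choose_album_year items out) := by unfold Spec_choose_album_year; infer_instance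

-- ===== CLAIM (what is proved, stated in full; the proofs are below) =====
def Claim_equal_choose_album_year : Prop := ∀ (items : List (String × (List (String × String)))), Dom_choose_album_year items → Spec_choose_album_year items (choose_album_year items)

-- ===== LEMMAS AND PROOFS =====

-- the per-year sort key (numeric prefix, string) and the frequency-then-key selection key
def pvKS (y : String) : Lex (Int × String) := toLex (pvNum4 y, y)
def pvK (full : List String) (y : String) : Lex (Int × Lex (Int × String)) :=
  toLex (-(full.count y : Int), pvKS y)
-- A-side pair key: Python's tuple (-c, num, y) compared lexicographically
def pvKey (p : String × Int) : Lex (Int × Lex (Int × String)) :=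
  toLex (-p.2, pvKS p.1)

theorem pvKS_inj {a b : String} (h : pvKS a = pvKS b) : a = b := by
  have := toLex.injective h
  exact congrArg Prod.snd this

-- sorted2 with keys into linear orders is sorted with the lexicographic key
theorem pv_sorted2_eq {α : Type} (xs : List α) (k1 : α → Int) (k2 : α → String) :
    PySem.List.sorted2 xs k1 k2 =
      PySem.List.sorted xs (fun x => (toLex (k1 x, k2 x) : Lex (Int × String))) := by
  unfold PySem.List.sorted2 PySem.List.sorted
  simp only [if_neg (by decide : ¬ (false = true))]
  have hcmp : (fun (a b : α) => decide (k1 a < k1 b) || (!decide (k1 b < k1 a) && decide (k2 a < k2 b)))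
      = (fun (a b : α) => decide ((toLex (k1 a, k2 a) : Lex (Int × String)) < toLex (k1 b, k2 b))) := by
    funext a b
    rcases lt_trichotomy (k1 a) (k1 b) with h | h | h
    · simp [Prod.Lex.lt_iff, h]
    · simp [Prod.Lex.lt_iff, h]
    · have h1 : decide (k1 b < k1 a) = true := decide_eq_true h
      have h2 : decide (k1 a = k1 b) = false := decide_eq_false (by omega)
      simp [Prod.Lex.lt_iff, not_lt_of_gt h, h1, h2]
  rw [hcmp]

theorem pv_counter_ne_nil (y : String) (t : List String) :
    (PySem.Dict.counter (y :: t)).items ≠ [] := by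
  intro h
  have hc := PySem.Dict.getD_counter (y :: t) y
  have h0 : (PySem.Dict.counter (y :: t)).getD y 0 = 0 := by
    rcases hd : PySem.Dict.counter (y :: t) with ⟨its⟩
    have : its = [] := by rw [hd] at h; exact h
    subst this
    rfl
  rw [h0] at hc
  simp [List.count_cons_self] at hc
  omega

theorem pv_foldl_min (rest : List (String × Int)) (p : String × Int) :
    (rest.foldl (fun best x => if pvKey x < pvKey best then x else best) p) ∈ p :: rest ∧
      ∀ x ∈ p :: rest,
        pvKey (rest.foldl (fun best x => if pvKey x < pvKey best then x else best) p) ≤ pvKey x := by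
  induction rest generalizing p with
  | nil => simp
  | cons x rest ih =>
    simp only [List.foldl_cons]
    by_cases hc : pvKey x < pvKey p
    · simp only [if_pos hc]
      obtain ⟨ihm, ihmin⟩ := ih x
      refine ⟨?_, ?_⟩
      · rcases List.mem_cons.mp ihm with h | h
        · simp [h]
        · simp [List.mem_cons, h]
      · intro z hz
        have hhead := ihmin x List.mem_cons_self
        rcases List.mem_cons.mp hz with h | h
        · exact h ▸ le_trans hhead (le_of_lt hc)
        · rcases List.mem_cons.mp h with h' | h'
          · exact h' ▸ hhead
          · exact ihmin _ (List.mem_cons_of_mem _ h')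
    · simp only [if_neg hc]
      obtain ⟨ihm, ihmin⟩ := ih p
      refine ⟨?_, ?_⟩
      · rcases List.mem_cons.mp ihm with h | h
        · simp [h]
        · simp [List.mem_cons, h]
      · intro z hz
        have hhead := ihmin p List.mem_cons_self
        rcases List.mem_cons.mp hz with h | h
        · exact h ▸ hhead
        · rcases List.mem_cons.mp h with h' | h'
          · exact h' ▸ le_trans hhead (le_of_not_gt hc)
          · exact ihmin _ (List.mem_cons_of_mem _ h')

theorem pv_key_le_fst {a b : String × Int} (h : pvKey a ≤ pvKey b) : b.2 ≤ a.2 := by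
  rcases Prod.Lex.le_iff.mp h with h' | h' <;> simp [pvKey] at h' <;> omega

theorem pv_key_le_snd {a b : String × Int} (h : pvKey a ≤ pvKey b) (he : a.2 = b.2) :
    pvKS a.1 ≤ pvKS b.1 := by
  rcases Prod.Lex.le_iff.mp h with h' | h'
  · exfalso; simp [pvKey, he] at h'
  · simpa [pvKey] using h'.2

-- A-side: the max/filter/sort/head pipeline equals the keyed foldl min over the counter items
set_option maxHeartbeats 1600000 in
theorem pv_select (p : String × Int) (rest : List (String × Int)) :
    (match PySem.List.pyGet?
        (PySem.List.sorted2
          ((((p :: rest).filter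
              (fun q => q.2 == (PySem.List.max? ((p :: rest).map (fun x => x.2)) (fun v => v)).getD 0)).map
            (fun q => q.1)).map (fun y => (pvNum4 y, y)))
          (fun x => x.1) (fun x => x.2)) 0 with
      | some q => q.2
      | none => "") =
    (rest.foldl (fun best x => if pvKey x < pvKey best then x else best) p).1 := by
  obtain ⟨hmem, hmin⟩ := pv_foldl_min rest p
  set m := rest.foldl (fun best x => if pvKey x < pvKey best then x else best) p with hm
  clear_value m
  obtain ⟨v, hv⟩ : ∃ v, PySem.List.max? ((p :: rest).map (fun x => x.2)) (fun v => v) = some v := by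
    rcases h : PySem.List.max? ((p :: rest).map (fun x => x.2)) (fun v => v) with _ | v
    · exact absurd ((PySem.List.max?_eq_none_iff _ _).mp h) (by simp)
    · exact ⟨v, h⟩
  rw [hv]
  have hmax : ∀ c ∈ (p :: rest).map (fun x => x.2), c ≤ v := PySem.List.max?_isMax hv
  obtain ⟨q, hqL, hq2⟩ := List.mem_map.mp (PySem.List.max?_mem hv)
  have hm2 : m.2 = v := by
    have h1 : m.2 ≤ v := hmax _ (List.mem_map_of_mem hmem)
    have h2 : q.2 ≤ m.2 := pv_key_le_fst (hmin q hqL)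
    omega
  have hfm : (pvNum4 m.1, m.1) ∈
      ((((p :: rest).filter (fun q => q.2 == (some v).getD 0)).map (fun q => q.1)).map
        (fun y => (pvNum4 y, y))) := by
    refine List.mem_map_of_mem (List.mem_map_of_mem (List.mem_filter.mpr ⟨hmem, ?_⟩))
    simp [hm2]
  rw [pv_sorted2_eq]
  rcases hs : PySem.List.sorted
      ((((p :: rest).filter (fun q => q.2 == (some v).getD 0)).map (fun q => q.1)).map
        (fun y => (pvNum4 y, y))) (fun x => (toLex (x.1, x.2) : Lex (Int × String))) with _ | ⟨h1, tl⟩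
  · exact absurd ((PySem.List.sorted_eq_nil_iff _ _ _).mp hs) (List.ne_nil_of_mem hfm)
  · simp only [PySem.List.pyGet?_zero_cons]
    have hhead := PySem.List.key_head_sorted_le _ _ hs
    have h1mem : h1 ∈
        ((((p :: rest).filter (fun q => q.2 == (some v).getD 0)).map (fun q => q.1)).map
          (fun y => (pvNum4 y, y))) := by
      have hmemS : h1 ∈ PySem.List.sorted
          ((((p :: rest).filter (fun q => q.2 == (some v).getD 0)).map (fun q => q.1)).map
            (fun y => (pvNum4 y, y))) (fun x : Int × String => (toLex (x.1, x.2) : Lex (Int × String))) false := by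
        rw [hs]; exact List.mem_cons_self
      exact (PySem.List.mem_sorted _ _ _ _).mp hmemS
    obtain ⟨y0, hy0C, hy0⟩ := List.mem_map.mp h1mem
    obtain ⟨q', hq'F, hq'1⟩ := List.mem_map.mp hy0C
    have hq'L : q' ∈ p :: rest := (List.mem_filter.mp hq'F).1
    have hq'2 : q'.2 = v := by
      have := (List.mem_filter.mp hq'F).2
      simpa using this
    simp only [Prod.mk.eta] at hhead
    have hle1 := hhead _ hfm
    have hsnd := pv_key_le_snd (hmin q' hq'L) (by omega)
    rw [hq'1] at hsnd
    unfold pvKS at hsnd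
    rw [hy0] at hsnd
    have heq := le_antisymm hle1 hsnd
    have hpair := toLex.injective heq
    exact congrArg Prod.snd hpair

-- A-side wrap-up: the result of the keyed foldl min over the counter items is a minimizer of pvK
theorem pv_A_min (years : List String) (p : String × Int) (rest : List (String × Int))
    (hitems : (PySem.Dict.counter years).items = p :: rest) :
    (rest.foldl (fun best x => if pvKey x < pvKey best then x else best) p).1 ∈ years ∧
      ∀ y ∈ years, pvK years (rest.foldl (fun best x => if pvKey x < pvKey best then x else best) p).1 ≤ pvK years y := by
  obtain ⟨hmem, hmin⟩ := pv_foldl_min rest p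
  set m := rest.foldl (fun best x => if pvKey x < pvKey best then x else best) p with hm
  clear_value m
  have hI : p :: rest = (PySem.Set.ofList years).map (fun k => (k, (years.count k : Int))) := by
    rw [← hitems, PySem.Dict.items_counter]
  rw [hI] at hmem hmin
  obtain ⟨k, hk, hkm⟩ := List.mem_map.mp hmem
  have hky : k ∈ years := (PySem.Set.mem_ofList _ _).mp hk
  subst hkm
  refine ⟨hky, ?_⟩
  intro y hy
  have hyi : (y, (years.count y : Int)) ∈ (PySem.Set.ofList years).map (fun k => (k, (years.count k : Int))) :=
    List.mem_map_of_mem (((PySem.Set.mem_ofList _ _).mpr hy))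
  simpa [pvK, pvKey, pvKS] using hmin _ hyi

-- antisymmetry of the sort key (keys determine the string)
set_option maxHeartbeats 1600000 in
theorem pvKS_antisymm {a b : String} (h1 : pvKS a ≤ pvKS b) (h2 : pvKS b ≤ pvKS a) : a = b :=
  pvKS_inj (le_antisymm h1 h2)

-- pvK comparison helpers (Lex (Int × Lex (Int × String)))
theorem pvK_le_iff (full : List String) (a x : String) :
    pvK full a ≤ pvK full x ↔
      (full.count x < full.count a ∨ (full.count x = full.count a ∧ pvKS a ≤ pvKS x)) := by
  unfold pvK
  rw [Prod.Lex.le_iff]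
  constructor
  · rintro (h | ⟨h1, h2⟩)
    · left; simp only [ofLex_toLex] at h; omega
    · refine Or.inr ⟨?_, ?_⟩
      · simp only [ofLex_toLex] at h1; omega
      · simpa using h2
  · rintro (h | ⟨h1, h2⟩)
    · left; simp only [ofLex_toLex]; omega
    · exact Or.inr ⟨by simp only [ofLex_toLex]; omega, by simpa using h2⟩

theorem pvK_le_of_lt {full : List String} {a x : String} (h : full.count x < full.count a) :
    pvK full a ≤ pvK full x := (pvK_le_iff full a x).mpr (Or.inl h)

theorem pvK_le_of_eq {full : List String} {a x : String} (h : full.count x = full.count a)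
    (h2 : pvKS a ≤ pvKS x) : pvK full a ≤ pvK full x := (pvK_le_iff full a x).mpr (Or.inr ⟨h, h2⟩)

theorem pvK_count_le {full : List String} {a x : String} (h : pvK full a ≤ pvK full x) :
    full.count x ≤ full.count a := by
  rcases (pvK_le_iff full a x).mp h with h' | h' <;> omega

-- pvK only looks at the counts of its two arguments, so it is stable under count-preserving extension
theorem pvK_congr {l1 l2 : List String} {a x : String} (ha : l1.count a = l2.count a)
    (hx : l1.count x = l2.count x) (h : pvK l1 a ≤ pvK l1 x) : pvK l2 a ≤ pvK l2 x := by
  rcases (pvK_le_iff l1 a x).mp h with h' | h'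
  · exact (pvK_le_iff l2 a x).mpr (Or.inl (by omega))
  · exact (pvK_le_iff l2 a x).mpr (Or.inr ⟨by omega, h'.2⟩)

-- B-side invariant: the run-length scan over a key-sorted list returns the pvK-minimizer
set_option maxHeartbeats 1600000 in
theorem pv_scan_inv (rest : List String) :
    ∀ (p : List String) (b c : String) (bl cl : Int),
      (p ++ rest).Pairwise (fun a b => pvKS a ≤ pvKS b) →
      c ∈ p → (∀ x ∈ p, pvKS x ≤ pvKS c) → cl = (p.count c : Int) →
      b ∈ p → bl = (p.count b : Int) →
      (∀ x ∈ p, pvK p b ≤ pvK p x) →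
      (rest.foldl pvStep (b, bl, c, cl)).1 ∈ p ++ rest ∧
        ∀ x ∈ p ++ rest, pvK (p ++ rest) (rest.foldl pvStep (b, bl, c, cl)).1 ≤ pvK (p ++ rest) x := by
  induction rest with
  | nil =>
    intro p b c bl cl hpair hc hcmax hcl hb hbl hmin
    simpa using ⟨hb, hmin⟩
  | cons y rest ih =>
    intro p b c bl cl hpair hc hcmax hcl hb hbl hmin
    have hy : ∀ x ∈ p, pvKS x ≤ pvKS y := by
      intro x hx
      exact (List.pairwise_append.mp hpair).2.2 x hx y (List.mem_cons_self)
    have hassoc : p ++ y :: rest = (p ++ [y]) ++ rest := by simp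
    rw [hassoc] at hpair ⊢
    simp only [List.foldl_cons]
    have hcnt_ne : ∀ x : String, x ≠ y → (p ++ [y]).count x = p.count x := by
      intro x hx
      simp [List.count_append, Ne.symm hx]
    have hcnt_y : (p ++ [y]).count y = p.count y + 1 := by
      simp [List.count_append]
    by_cases hyc : y = c
    · subst hyc
      by_cases hgt : cl + 1 > bl
      · -- update fires: best := cur = y with count cl+1
        have hstep : pvStep (b, bl, y, cl) y = (y, cl + 1, y, cl + 1) := by
          unfold pvStep
          simp only
          simp [hgt]
        rw [hstep]
        -- every old count is at most p.count b = bl ≤ cl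
        have hble : ∀ x ∈ p, (p.count x : Int) ≤ bl := by
          intro x hx
          have := pvK_count_le (hmin x hx)
          omega
        refine ih (p ++ [y]) y y (cl + 1) (cl + 1) hpair (by simp) ?_ ?_ (by simp) ?_ ?_
        · intro x hx
          rcases List.mem_append.mp hx with hx | hx
          · exact hy x hx
          · simp at hx; subst hx; exact le_refl _
        · rw [hcnt_y]; omega
        · rw [hcnt_y]; omega
        · intro x hx
          rcases List.mem_append.mp hx with hx | hx
          · by_cases hxy : x = y
            · subst hxy; exact le_refl _
            · apply pvK_le_of_lt
              rw [hcnt_ne x hxy, hcnt_y]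
              have h1 := hble x hx
              have h2 : (p.count y : Int) = cl := by omega
              omega
          · simp at hx; subst hx; exact le_refl _
      · -- no update: cur_len grows but stays ≤ best_len; b ≠ y here
        have hbc : b ≠ y := by
          intro h; subst h; omega
        have hstep : pvStep (b, bl, y, cl) y = (b, bl, y, cl + 1) := by
          unfold pvStep
          simp only
          simp [hgt]
        rw [hstep]
        refine ih (p ++ [y]) b y bl (cl + 1) hpair (by simp) ?_ ?_ (List.mem_append_left _ hb) ?_ ?_
        · intro x hx
          rcases List.mem_append.mp hx with hx | hx
          · exact hy x hx
          · simp at hx; subst hx; exact le_refl _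
        · rw [hcnt_y]; omega
        · rw [hcnt_ne b hbc]; exact hbl
        · intro x hx
          by_cases hxy : x = y
          · subst hxy
            -- compare b against the grown current run
            rcases lt_or_eq_of_le (by omega : cl + 1 ≤ bl) with hlt | heq
            · apply pvK_le_of_lt
              rw [hcnt_ne b hbc, hcnt_y]
              omega
            · apply pvK_le_of_eq
              · rw [hcnt_ne b hbc, hcnt_y]; omega
              · exact hcmax b hb
          · rcases List.mem_append.mp hx with hx | hx
            · exact pvK_congr (hcnt_ne b hbc).symm (hcnt_ne x hxy).symm (hmin x hx)
            · simp at hx; exact absurd hx hxy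
    · -- a new run starts: y differs from cur, hence y is fresh (sorted, keys only grow)
      have hynp : y ∉ p := by
        intro hyp
        exact hyc (pvKS_antisymm (hcmax y hyp) (hy c hc))
      have hbly : b ≠ y := by intro h; subst h; exact hynp hb
      have hbl1 : 1 ≤ bl := by
        rw [hbl]
        have := List.count_pos_iff.mpr hb
        omega
      have hstep : pvStep (b, bl, c, cl) y = (b, bl, y, 1) := by
        unfold pvStep
        simp only
        simp [hyc, show ¬ (1 : Int) > bl by omega]
      rw [hstep]
      have hcnty0 : p.count y = 0 := by
        simp [List.count_eq_zero]
        exact hynp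
      refine ih (p ++ [y]) b y bl 1 hpair (by simp) ?_ ?_ ?_ ?_ ?_
      · intro x hx
        rcases List.mem_append.mp hx with hx | hx
        · exact hy x hx
        · simp at hx; subst hx; exact le_refl _
      · rw [hcnt_y, hcnty0]; simp
      · exact List.mem_append_left _ hb
      · rw [hcnt_ne b hbly]; exact hbl
      · intro x hx
        by_cases hxy : x = y
        · subst hxy
          rcases lt_or_eq_of_le hbl1 with hlt | heq
          · apply pvK_le_of_lt
            rw [hcnt_ne b hbly, hcnt_y, hcnty0]
            omega
          · apply pvK_le_of_eq
            · rw [hcnt_ne b hbly, hcnt_y, hcnty0]; omega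
            · exact hy b hb
        · rcases List.mem_append.mp hx with hx | hx
          · exact pvK_congr (hcnt_ne b hbly).symm (hcnt_ne x hxy).symm (hmin x hx)
          · simp at hx; exact absurd hx hxy

-- uniqueness: both programs return THE minimizer of pvK over years
set_option maxHeartbeats 1600000 in
theorem pv_unique (years : List String) {a b : String}
    (ha : a ∈ years ∧ ∀ y ∈ years, pvK years a ≤ pvK years y)
    (hb : b ∈ years ∧ ∀ y ∈ years, pvK years b ≤ pvK years y) : a = b := by
  have h1 := ha.2 b hb.1
  have h2 := hb.2 a ha.1
  have := le_antisymm h1 h2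
  have := toLex.injective this
  exact pvKS_inj (congrArg Prod.snd this)

-- ===== VERDICT (by name: the statement is the Claim_ definition above) =====
set_option maxHeartbeats 1600000 in
theorem choose_album_year_spec : Claim_equal_choose_album_year := by
  intro items _
  unfold Spec_choose_album_year
  simp only [choose_album_year, choose_album_year_alt]
  rcases hys : pvYears items with _ | ⟨y, t⟩
  · simp
  · simp only [if_neg (List.cons_ne_nil y t)]
    rcases hitems : (PySem.Dict.counter (y :: t)).items with _ | ⟨p, rest⟩
    · exact absurd hitems (pv_counter_ne_nil y t)
    · have hvals : (PySem.Dict.counter (y :: t)).values = (p :: rest).map (fun x => x.2) := by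
        show (PySem.Dict.counter (y :: t)).items.map (fun x => x.2) = _
        rw [hitems]
      rw [hvals, pv_select p rest]
      have hA := pv_A_min (y :: t) p rest hitems
      -- B side
      have hs_eq : PySem.List.sorted2 (y :: t) (fun y => pvNum4 y) (fun y => y)
          = PySem.List.sorted (y :: t) (fun x => pvKS x) := pv_sorted2_eq (y :: t) _ _
      rcases hmatch : PySem.List.sorted2 (y :: t) (fun y => pvNum4 y) (fun y => y) with _ | ⟨s0, st⟩
      · rw [hs_eq] at hmatch
        exact absurd ((PySem.List.sorted_eq_nil_iff _ _ _).mp hmatch) (by simp)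
      · simp only
        have hs : PySem.List.sorted (y :: t) (fun x => pvKS x) = s0 :: st := by
          rw [← hs_eq, hmatch]
        have hperm : (s0 :: st).Perm (y :: t) := by
          rw [← hs]; exact PySem.List.sorted_perm _ _ _
        have hpair : (s0 :: st).Pairwise (fun a b => pvKS a ≤ pvKS b) := by
          rw [← hs]; exact PySem.List.sorted_pairwise _ _
        have hstep0 : pvStep (s0, 0, s0, 0) s0 = (s0, 1, s0, 1) := by
          unfold pvStep
          simp
        have hfold : (s0 :: st).foldl pvStep (s0, 0, s0, 0) = st.foldl pvStep (s0, 1, s0, 1) := by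
          rw [List.foldl_cons, hstep0]
        rw [hfold]
        have hB := pv_scan_inv st [s0] s0 s0 1 1 (by simpa using hpair) (by simp)
          (by intro x hx; simp at hx; subst hx; exact le_refl _) (by simp)
          (by simp) (by simp)
          (by intro x hx; simp at hx; subst hx; exact le_refl _)
        have hs0st : [s0] ++ st = s0 :: st := by simp
        rw [hs0st] at hB
        refine pv_unique (y :: t) hA ⟨hperm.mem_iff.mp hB.1, ?_⟩
        intro x hx
        have hx' : x ∈ s0 :: st := hperm.mem_iff.mpr hx
        exact pvK_congr (hperm.count_eq _) (hperm.count_eq _) (hB.2 x hx')
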